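-- pv_equiv track=rewrite | github.com/Aparnap2/autoadmin-APP | backend/agents/enhanced_ceo_agent.py | _extract_business_impact
-- ===== SOURCE A (Python) =====
-- def _extract_business_impact(response: str) -> str:
--     """Extract business impact assessment from response"""
--     lines = response.split('\n')
--     impact_section = []
--
--     capturing = False
--     for line in lines:
--         line_lower = line.lower().strip()
--
--         if any(keyword in line_lower for keyword in ["business impact", "impact", "roi", "financial"]):
--             capturing = True
--             if line.strip():
--                 impact_section.append(line.strip())
--         elif capturing and (line.startswith('\n') or not line.strip()):
--             break
--         elif capturing and line.strip():
--             impact_section.append(line.strip())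
--
--     return ' '.join(impact_section) if impact_section else "Business impact assessment not specified"
-- ===== SOURCE B (Python) =====
-- KEYWORDS = ("business impact", "impact", "roi", "financial")
--
--
-- def _has_keyword(line: str) -> bool:
--     line_lower = line.lower().strip()
--     return any(keyword in line_lower for keyword in KEYWORDS)
--
--
-- def _extract_business_impact(response: str) -> str:
--     """Extract business impact assessment from response (find-then-collect)."""
--     lines = response.split('\n')
--     start = next((i for i, line in enumerate(lines) if _has_keyword(line)), None)
--     if start is None:
--         return "Business impact assessment not specified"
--     section = []
--     for line in lines[start:]:
--         if not line.strip():
--             break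
--         section.append(line.strip())
--     return ' '.join(section)
-- ===== Notes on version B (the rewrite author's own statement) =====
-- stated objective: simpler
-- what changed: Replaced the single stateful loop with a capturing flag and three guarded branches by an explicit two-phase find-then-collect: locate the first keyword line, then gather stripped lines until the first blank one.
import Mathlib
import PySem

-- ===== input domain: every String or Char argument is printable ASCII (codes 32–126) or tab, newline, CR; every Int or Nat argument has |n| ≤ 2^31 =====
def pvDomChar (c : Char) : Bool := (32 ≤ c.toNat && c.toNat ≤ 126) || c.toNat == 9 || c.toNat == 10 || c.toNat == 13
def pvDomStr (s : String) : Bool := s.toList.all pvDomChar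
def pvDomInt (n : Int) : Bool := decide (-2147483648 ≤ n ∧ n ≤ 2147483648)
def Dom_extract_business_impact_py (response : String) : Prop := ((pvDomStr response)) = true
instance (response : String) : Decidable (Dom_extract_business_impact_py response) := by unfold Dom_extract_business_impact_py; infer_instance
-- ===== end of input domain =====

-- B replaces A's single stateful loop (capturing flag + three guarded branches) by an
-- explicit two-phase find-then-collect decomposition; same result, same cost (objective: simpler).


-- ===== PORT A =====
-- the keyword literals of A's `any(...)`
def pvKeywords : List (List Char) :=
  ["business impact".toList, "impact".toList, "roi".toList, "financial".toList]

-- A's for-loop: state = (capturing, impact_section); `break` = return acc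
def pvLoopA : List (List Char) → Bool → List (List Char) → List (List Char)
  | [], _, acc => acc
  | line :: rest, capturing, acc =>
    let lineLower := PySem.Chars.strip (PySem.Chars.lower line)
    if pvKeywords.any (fun k => PySem.Chars.isIn k lineLower) then
      pvLoopA rest true
        (if !(PySem.Chars.strip line).isEmpty then acc ++ [PySem.Chars.strip line] else acc)
    else if capturing && (PySem.Chars.startswith line "\n".toList || (PySem.Chars.strip line).isEmpty) then
      acc
    else if capturing && !(PySem.Chars.strip line).isEmpty then
      pvLoopA rest capturing (acc ++ [PySem.Chars.strip line])
    else
      pvLoopA rest capturing acc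

def extract_business_impact_py (response : String) : String :=
  let lines := PySem.Chars.splitOn response.toList "\n".toList
  let sec := pvLoopA lines false []
  if !sec.isEmpty then String.ofList (PySem.Chars.join " ".toList sec)
  else "Business impact assessment not specified"

-- ===== PORT B =====
def pvHasKeyword (line : List Char) : Bool :=
  pvKeywords.any (fun k => PySem.Chars.isIn k (PySem.Chars.strip (PySem.Chars.lower line)))

-- `next((i for i, line in enumerate(lines) if ...), None)`
def pvFindStart : List (List Char) → Nat → Option Nat
  | [], _ => none
  | line :: rest, i => if pvHasKeyword line then some i else pvFindStart rest (i + 1)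

-- the collect loop over `lines[start:]`, breaking on the first blank line
def pvCollect : List (List Char) → List (List Char)
  | [] => []
  | line :: rest =>
    if (PySem.Chars.strip line).isEmpty then []
    else PySem.Chars.strip line :: pvCollect rest

def extract_business_impact_py_alt (response : String) : String :=
  let lines := PySem.Chars.splitOn response.toList "\n".toList
  match pvFindStart lines 0 with
  | none => "Business impact assessment not specified"
  | some i => String.ofList (PySem.Chars.join " ".toList (pvCollect (lines.drop i)))

-- ===== PRECONDITION & SPEC =====
def Spec_extract_business_impact_py (response : String) (out : String) : Prop := out = extract_business_impact_py_alt response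
instance (response : String) (out : String) : Decidable (Spec_extract_business_impact_py response out) := by unfold Spec_extract_business_impact_py; infer_instance

-- ===== CLAIM (what is proved, stated in full; the proofs are below) =====
def Claim_equal_extract_business_impact_py : Prop := ∀ (response : String), Dom_extract_business_impact_py response → Spec_extract_business_impact_py response (extract_business_impact_py response)

-- ===== LEMMAS AND PROOFS =====

-- lowering a character does not change whether it is whitespace
theorem pv_isspace_lowerChar (c : Char) :
    PySem.Chars.isspace (PySem.Chars.lowerChar c) = PySem.Chars.isspace c := by
  unfold PySem.Chars.lowerChar
  split
  · rename_i h
    unfold PySem.Chars.isupper at h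
    simp at h
    obtain ⟨h1, h2⟩ := h
    have hA : 65 ≤ c.toNat := h1
    have hZ : c.toNat ≤ 90 := h2
    have hv : (c.toNat + 32).isValidChar := by constructor; omega
    have ht : (Char.ofNat (c.toNat + 32)).toNat = c.toNat + 32 := by
      simp [Char.ofNat, hv]
    simp [PySem.Chars.isspace, ht]
    rw [Bool.eq_iff_iff]
    simp only [Bool.or_eq_true, Bool.and_eq_true, decide_eq_true_eq]
    omega
  · rfl

theorem pv_strip_lower (cs : List Char) :
    PySem.Chars.strip (PySem.Chars.lower cs) = PySem.Chars.lower (PySem.Chars.strip cs) := by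
  have hpred : (PySem.Chars.isspace ∘ PySem.Chars.lowerChar) = PySem.Chars.isspace := by
    funext c; simp [Function.comp, pv_isspace_lowerChar]
  simp [PySem.Chars.strip, PySem.Chars.lstrip, PySem.Chars.rstrip, PySem.Chars.lower,
        List.dropWhile_map, ← List.map_reverse, hpred]

-- a line that strips to empty contains no keyword
theorem pv_blank_no_keyword (line : List Char) (h : (PySem.Chars.strip line).isEmpty = true) :
    pvHasKeyword line = false := by
  have hs : PySem.Chars.strip line = [] := by
    cases hsl : PySem.Chars.strip line with
    | nil => rfl
    | cons a t => rw [hsl] at h; simp [List.isEmpty] at h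
  unfold pvHasKeyword
  rw [pv_strip_lower, hs]
  decide

-- pvFindStart with a shifted start index
theorem pv_findStart_shift (t : List (List Char)) (i : Nat) :
    pvFindStart t (i + 1) = (pvFindStart t i).map (· + 1) := by
  induction t generalizing i with
  | nil => simp [pvFindStart]
  | cons a s ihs =>
    by_cases ha : pvHasKeyword a = true
    · simp [pvFindStart, ha]
    · simp only [Bool.not_eq_true] at ha
      simp [pvFindStart, ha, ihs]

-- once capturing, A appends every stripped line until the first blank one
theorem pv_loopA_capturing (l : List (List Char)) (acc : List (List Char))
    (hnl : ∀ line ∈ l, PySem.Chars.startswith line ['\n'] = false) :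
    pvLoopA l true acc = acc ++ pvCollect l := by
  induction l generalizing acc with
  | nil => simp [pvLoopA, pvCollect]
  | cons line rest ih =>
    have ih' := fun acc => ih acc (fun x hx => hnl x (List.mem_cons_of_mem _ hx))
    by_cases hb : (PySem.Chars.strip line).isEmpty = true
    · have hk : pvHasKeyword line = false := pv_blank_no_keyword line hb
      unfold pvHasKeyword at hk
      simp [pvLoopA, pvCollect, hk, hb]
    · simp only [Bool.not_eq_true] at hb
      by_cases hk : pvKeywords.any
          (fun k => PySem.Chars.isIn k (PySem.Chars.strip (PySem.Chars.lower line))) = true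
      · simp [pvLoopA, pvCollect, hk, hb, ih']
      · simp only [Bool.not_eq_true] at hk
        simp [pvLoopA, pvCollect, hk, hb, hnl line (List.mem_cons_self), ih']

-- unfolding equations of PySem.Chars.splitOn.go (fuel > 0)
theorem pv_go_nil (fuel : Nat) (cur : List Char) (acc : List (List Char)) :
    PySem.Chars.splitOn.go ['\n'] (fuel + 1) [] cur acc = (cur.reverse :: acc).reverse := by
  rw [PySem.Chars.splitOn.go.eq_def]

theorem pv_go_cons (fuel : Nat) (c : Char) (rest cur : List Char) (acc : List (List Char)) :
    PySem.Chars.splitOn.go ['\n'] (fuel + 1) (c :: rest) cur acc =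
      (if ['\n'].isPrefixOf (c :: rest) then
        PySem.Chars.splitOn.go ['\n'] fuel (List.drop 1 (c :: rest)) [] (cur.reverse :: acc)
      else PySem.Chars.splitOn.go ['\n'] fuel rest (c :: cur) acc) := by
  rw [PySem.Chars.splitOn.go.eq_def]
  rfl

-- invariant of splitOn.go: with enough fuel and sep = ['\n'], no produced piece contains '\n'
theorem pv_splitOn_go_inv (fuel : Nat) :
    ∀ (l cur : List Char) (acc : List (List Char)), l.length < fuel →
      (∀ p ∈ acc, '\n' ∉ p) → '\n' ∉ cur →
      ∀ p ∈ PySem.Chars.splitOn.go ['\n'] fuel l cur acc, '\n' ∉ p := by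
  induction fuel with
  | zero => intro l cur acc hl; omega
  | succ fuel ih =>
    intro l cur acc hl hacc hcur p hp
    cases l with
    | nil =>
      rw [pv_go_nil] at hp
      simp at hp
      rcases hp with h | h
      · exact hacc p h
      · subst h; simpa using hcur
    | cons c rest =>
      rw [pv_go_cons] at hp
      by_cases hc : c = '\n'
      · subst hc
        rw [if_pos (by simp [List.isPrefixOf])] at hp
        refine ih _ [] _ (by simpa using hl) ?_ (by simp) p hp
        intro q hq
        rcases List.mem_cons.mp hq with h | h
        · subst h; simpa using hcur
        · exact hacc q h
      · rw [if_neg (by simp [List.isPrefixOf]; exact fun h => hc h.symm)] at hp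
        refine ih rest (c :: cur) acc (by simpa using hl) hacc ?_ p hp
        simp [hcur, Ne.symm hc]

-- every piece of a split on '\n' does not start with '\n'
theorem pv_splitOn_no_newline (cs : List Char) :
    ∀ line ∈ PySem.Chars.splitOn cs ['\n'], PySem.Chars.startswith line ['\n'] = false := by
  intro line hline
  have hnot : '\n' ∉ line :=
    pv_splitOn_go_inv (cs.length + 1) cs [] [] (by omega) (by simp) (by simp) line
      (by simpa [PySem.Chars.splitOn] using hline)
  cases hsw : PySem.Chars.startswith line ['\n'] with
  | false => rfl
  | true =>
    have hpre := (PySem.Chars.startswith_iff line ['\n']).mp hsw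
    exact absurd (hpre.subset (by simp)) hnot

-- A's whole loop from the non-capturing start = find first keyword line, then collect
theorem pv_loopA_eq_find (l : List (List Char))
    (hnl : ∀ line ∈ l, PySem.Chars.startswith line ['\n'] = false) :
    pvLoopA l false [] =
      (match pvFindStart l 0 with
       | none => []
       | some i => pvCollect (l.drop i)) := by
  induction l with
  | nil => simp [pvLoopA, pvFindStart]
  | cons line rest ih =>
    by_cases hk : pvHasKeyword line = true
    · have hk' := hk
      unfold pvHasKeyword at hk'
      have hb : ¬ (PySem.Chars.strip line).isEmpty = true := by
        intro hb
        rw [pv_blank_no_keyword line hb] at hk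
        exact Bool.false_ne_true hk
      simp only [Bool.not_eq_true] at hb
      simp [pvLoopA, pvFindStart, hk, hk', hb, pvCollect,
            pv_loopA_capturing rest _ (fun x hx => hnl x (List.mem_cons_of_mem _ hx))]
    · have hk' : pvKeywords.any
          (fun k => PySem.Chars.isIn k (PySem.Chars.strip (PySem.Chars.lower line))) = false := by
        unfold pvHasKeyword at hk
        simpa using hk
      rw [pvFindStart.eq_def]
      simp only [hk, Bool.false_eq_true, if_false]
      rw [pv_findStart_shift rest 0]
      simp only [pvLoopA, hk']
      simp only [Bool.false_and, if_false, Bool.false_eq_true]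
      rw [ih (fun x hx => hnl x (List.mem_cons_of_mem _ hx))]
      cases pvFindStart rest 0 with
      | none => simp
      | some i => simp

-- the found index points at a keyword line
theorem pv_findStart_keyword (l : List (List Char)) (i : Nat)
    (h : pvFindStart l 0 = some i) :
    ∃ line rest, l.drop i = line :: rest ∧ pvHasKeyword line = true := by
  induction l generalizing i with
  | nil => simp [pvFindStart] at h
  | cons a s ih =>
    by_cases ha : pvHasKeyword a = true
    · simp [pvFindStart, ha] at h
      subst h
      exact ⟨a, s, rfl, ha⟩
    · simp only [Bool.not_eq_true] at ha
      simp only [pvFindStart, ha, Bool.false_eq_true, if_false] at h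
      rw [pv_findStart_shift s 0] at h
      cases hj : pvFindStart s 0 with
      | none => rw [hj] at h; simp at h
      | some j =>
        rw [hj] at h
        simp only [Option.map_some, Option.some.injEq] at h
        obtain ⟨line, rest, hd, hk⟩ := ih j hj
        subst h
        exact ⟨line, rest, by simpa using hd, hk⟩

-- ===== VERDICT (by name: the statement is the Claim_ definition above) =====
theorem extract_business_impact_py_spec : Claim_equal_extract_business_impact_py := by
  intro response _
  unfold Spec_extract_business_impact_py
  unfold extract_business_impact_py extract_business_impact_py_alt
  simp only
  simp only [show "\n".toList = ['\n'] from rfl]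
  rw [pv_loopA_eq_find _ (pv_splitOn_no_newline response.toList)]
  cases hf : pvFindStart (PySem.Chars.splitOn response.toList ['\n']) 0 with
  | none => simp
  | some i =>
    obtain ⟨line, rest, hd, hk⟩ := pv_findStart_keyword _ i hf
    have hb : (PySem.Chars.strip line).isEmpty = false := by
      cases hbe : (PySem.Chars.strip line).isEmpty with
      | false => rfl
      | true => rw [pv_blank_no_keyword line hbe] at hk; exact absurd hk Bool.false_ne_true
    simp [hd, pvCollect, hb]
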